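-- pv_equiv track=rewrite | github.com/ZacharyACoon/AdventOfCode | 2021/python/aoc2021/day8/solution_attempt1.py | map_segment_count_to_combo
-- ===== SOURCE A (Python) =====
-- def map_segment_count_to_combo(combos):
--     lens_to_combo = {}
--     for combo in combos:
--         l = len(combo)
--         if l not in lens_to_combo:
--             lens_to_combo[l] = [combo]
--         else:
--             lens_to_combo[l].append(combo)
--     return lens_to_combo
-- ===== SOURCE B (Python) =====
-- def map_segment_count_to_combo(combos):
--     # Two-phase: collect the distinct lengths in first-occurrence order,
--     # then build each group with one filtering pass per length.
--     lengths = []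
--     for combo in combos:
--         if len(combo) not in lengths:
--             lengths.append(len(combo))
--     return {l: [c for c in combos if len(c) == l] for l in lengths}
-- ===== Notes on version B (the rewrite author's own statement) =====
-- stated objective: alternative
-- what changed: Replaces A's single-pass dict-of-lists accumulation with a two-phase decomposition: a dedup pass collecting distinct lengths in first-occurrence order, then a dict comprehension building each group by filtering the input per length.
import Mathlib
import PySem

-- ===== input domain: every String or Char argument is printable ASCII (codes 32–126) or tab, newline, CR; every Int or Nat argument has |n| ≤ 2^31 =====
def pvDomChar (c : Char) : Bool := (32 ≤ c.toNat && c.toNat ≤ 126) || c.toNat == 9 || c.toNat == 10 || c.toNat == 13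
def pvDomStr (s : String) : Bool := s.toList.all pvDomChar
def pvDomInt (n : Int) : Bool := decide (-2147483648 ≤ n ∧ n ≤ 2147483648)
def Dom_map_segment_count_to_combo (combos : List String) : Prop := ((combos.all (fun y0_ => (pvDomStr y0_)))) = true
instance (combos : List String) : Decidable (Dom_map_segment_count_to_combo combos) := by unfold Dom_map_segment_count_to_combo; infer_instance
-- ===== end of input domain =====

-- B groups combos by length via a dedup pass over lengths plus one filter per length,
-- instead of A's incremental dict-of-lists accumulation; same result, different decomposition (no speed claim).

-- ===== PORT A =====
def map_segment_count_to_combo (combos : List String) : List (Int × List String) :=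
  (combos.foldl (fun lens_to_combo combo =>
      let l : Int := PySem.Str.len combo
      if lens_to_combo.contains l = false then
        lens_to_combo.insert l [combo]
      else
        lens_to_combo.insert l (lens_to_combo.getD l [] ++ [combo]))
    PySem.Dict.empty).items

-- ===== PORT B =====
def map_segment_count_to_combo_alt (combos : List String) : List (Int × List String) :=
  let lengths := combos.foldl (fun lengths combo =>
      if lengths.contains (PySem.Str.len combo) then lengths
      else lengths ++ [PySem.Str.len combo]) ([] : List Int)
  lengths.map (fun l => (l, combos.filter (fun c => PySem.Str.len c == l)))

-- ===== PRECONDITION & SPEC =====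
def Spec_map_segment_count_to_combo (combos : List String) (out : List (Int × List String)) : Prop := out = map_segment_count_to_combo_alt combos
instance (combos : List String) (out : List (Int × List String)) : Decidable (Spec_map_segment_count_to_combo combos out) := by unfold Spec_map_segment_count_to_combo; infer_instance

-- ===== CLAIM (what is proved, stated in full; the proofs are below) =====
def Claim_equal_map_segment_count_to_combo : Prop := ∀ (combos : List String), Dom_map_segment_count_to_combo combos → Spec_map_segment_count_to_combo combos (map_segment_count_to_combo combos)

-- ===== LEMMAS AND PROOFS =====

-- A's loop body is exactly dict-modify (d[l] = d.get(l, []) + [combo]).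
theorem stepA_eq_modify (d : PySem.Dict Int (List String)) (combo : String) :
    (if d.contains (PySem.Str.len combo) = false then
        d.insert (PySem.Str.len combo) [combo]
      else
        d.insert (PySem.Str.len combo) (d.getD (PySem.Str.len combo) [] ++ [combo]))
    = d.modify (PySem.Str.len combo) [] (· ++ [combo]) := by
  show _ = d.insert (PySem.Str.len combo) (d.getD (PySem.Str.len combo) [] ++ [combo])
  by_cases h : d.contains (PySem.Str.len combo) = false
  · rw [if_pos h, PySem.Dict.getD_of_not_contains (h := h), List.nil_append]
  · rw [if_neg h]

-- A's dict as a fold of modifies over (length, combo) pairs.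
theorem foldA_eq (combos : List String) :
    (combos.foldl (fun lens_to_combo combo =>
      let l : Int := PySem.Str.len combo
      if lens_to_combo.contains l = false then
        lens_to_combo.insert l [combo]
      else
        lens_to_combo.insert l (lens_to_combo.getD l [] ++ [combo]))
      PySem.Dict.empty)
    = (combos.map (fun c => ((PySem.Str.len c : Int), c))).foldl
        (fun d p => d.modify p.1 [] (· ++ [p.2])) PySem.Dict.empty := by
  rw [List.foldl_map]
  exact List.foldl_ext _ _ _ (fun d c _ => stepA_eq_modify d c)

-- ===== VERDICT (by name: the statement is the Claim_ definition above) =====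
theorem map_segment_count_to_combo_spec : Claim_equal_map_segment_count_to_combo := by
  intro combos _
  show map_segment_count_to_combo combos = map_segment_count_to_combo_alt combos
  unfold map_segment_count_to_combo map_segment_count_to_combo_alt
  rw [foldA_eq]
  set pairs := combos.map (fun c => ((PySem.Str.len c : Int), c)) with hpairs
  set D := pairs.foldl (fun d p => d.modify p.1 [] (· ++ [p.2])) PySem.Dict.empty with hD
  have hnd : D.keys.Nodup := by
    rw [hD]
    exact PySem.Dict.nodup_keys_foldl_modify_key pairs (·.1) [] _ _ PySem.Dict.nodup_keys_empty
  have hkeys : D.keys = PySem.Set.ofList (combos.map (fun c => (PySem.Str.len c : Int))) := by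
    rw [hD, PySem.Dict.keys_foldl_modify_key, PySem.Dict.keys_empty, PySem.Set.update_nil_left,
      hpairs, List.map_map]
    rfl
  have hlens : (combos.foldl (fun lengths combo =>
      if lengths.contains (PySem.Str.len combo) then lengths
      else lengths ++ [PySem.Str.len combo]) ([] : List Int))
      = PySem.Set.ofList (combos.map (fun c => (PySem.Str.len c : Int))) := by
    rw [← PySem.Set.update_nil_left, PySem.Set.update_map_eq_foldl_add]
    refine List.foldl_ext _ _ _ (fun s c _ => ?_)
    rw [PySem.Set.add_eq_ite]
    simp
  have hgetD : ∀ k : Int, D.getD k [] = combos.filter (fun c => PySem.Str.len c == k) := by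
    intro k
    rw [hD, PySem.Dict.getD_foldl_modify_append, PySem.Dict.getD_empty, hpairs,
      List.filter_map, List.map_map]
    simp [Function.comp_def]
  rw [PySem.Dict.items_eq_map_keys D hnd [], hkeys, hlens]
  exact List.map_congr_left (fun k _ => by rw [hgetD k])
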